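-- pv_equiv track=rewrite | github.com/sccdcwc/- | 14.py | setOfStacks
-- ===== SOURCE A (Python) =====
-- def setOfStacks(ope, size):
--     # write code here
--     list=[]
--     stack=[]
--     l=0
--     for i in ope:
--         if i[0]==1:
--             if l<size-1:
--                 list.append(i[1])
--                 l+=1
--             else:
--                 list.append(i[1])
--                 stack.append(list)
--                 list=[]
--                 l=0
--         if i[0]==2:
--             if l !=0:
--                 list.pop()
--                 l-=1
--             elif l == 0:
--                 list=stack.pop()
--                 list.pop()
--                 l=size-1
--     if len(list)!=0:
--         stack.append(list)
--     return stack
-- ===== SOURCE B (Python) =====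
-- def setOfStacks(ope, size):
--     flat = []
--     for i in ope:
--         if i[0] == 1:
--             flat.append(i[1])
--         elif i[0] == 2:
--             flat.pop()
--     return [flat[j:j+size] for j in range(0, len(flat), size)]
-- ===== Notes on version B (the rewrite author's own statement) =====
-- stated objective: simpler
-- what changed: B replaces A's incremental bookkeeping (current list, completed-stacks list, counter l) by a single flat accumulator driven by push/pop, chunked into consecutive size-slices once at the end.
-- outside the precondition, e.g. on setOfStacks([], 0): A returns [], B raises ValueError; on setOfStacks([[1, 5], [1, 6]], 0): A returns [[5], [6]], B raises ValueError; on setOfStacks([[1, 5]], -1): A returns [[5]], B returns []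
import Mathlib
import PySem

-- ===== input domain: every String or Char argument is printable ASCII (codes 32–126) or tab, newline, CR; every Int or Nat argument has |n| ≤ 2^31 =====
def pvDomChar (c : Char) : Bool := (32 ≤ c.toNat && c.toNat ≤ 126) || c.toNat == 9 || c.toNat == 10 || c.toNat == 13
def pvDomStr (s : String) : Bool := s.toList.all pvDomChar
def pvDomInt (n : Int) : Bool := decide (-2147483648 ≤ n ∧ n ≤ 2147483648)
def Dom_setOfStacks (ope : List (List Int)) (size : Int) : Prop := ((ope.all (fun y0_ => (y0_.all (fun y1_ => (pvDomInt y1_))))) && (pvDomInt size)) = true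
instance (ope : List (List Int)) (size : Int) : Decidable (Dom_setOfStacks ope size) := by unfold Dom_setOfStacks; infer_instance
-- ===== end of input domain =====

-- B replaces A's current-list + completed-stacks + counter bookkeeping by one flat
-- accumulator chunked once at the end (objective: simpler).

-- ===== PORT A =====
-- one iteration of A's for-loop; state = (stack, list, l); none = an exception in Python
def pvStepA (size : Int) (st : List (List Int) × List Int × Int) (i : List Int) :
    Option (List (List Int) × List Int × Int) :=
  match PySem.List.pyGet? i 0 with
  | none => none
  | some op =>
    match (if op = 1 then
             match PySem.List.pyGet? i 1 with
             | none => none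
             | some v =>
               if st.2.2 < size - 1 then some (st.1, st.2.1 ++ [v], st.2.2 + 1)
               else some (st.1 ++ [st.2.1 ++ [v]], ([] : List Int), (0 : Int))
           else some st) with
    | none => none
    | some (stack, lst, l) =>
      if op = 2 then
        if l ≠ 0 then
          match PySem.List.pop? lst with
          | none => none
          | some (_, lst') => some (stack, lst', l - 1)
        else
          match PySem.List.pop? stack with
          | none => none
          | some (top, stack') =>
            match PySem.List.pop? top with
            | none => none
            | some (_, top') => some (stack', top', size - 1)
      else some (stack, lst, l)

def setOfStacks (ope : List (List Int)) (size : Int) : List (List Int) :=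
  match ope.foldl (fun acc i => acc.bind (fun st => pvStepA size st i))
      (some (([] : List (List Int)), ([] : List Int), (0 : Int))) with
  | none => []          -- Python raises here; excluded by Pre_
  | some (stack, lst, _) => if lst.length ≠ 0 then stack ++ [lst] else stack

-- ===== PORT B =====
-- one iteration of B's loop on the flat accumulator; none = an exception in Python
def pvStepB (flat : List Int) (i : List Int) : Option (List Int) :=
  match PySem.List.pyGet? i 0 with
  | none => none
  | some op =>
    if op = 1 then (PySem.List.pyGet? i 1).map (fun v => flat ++ [v])
    else if op = 2 then (PySem.List.pop? flat).map (·.2)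
    else some flat

def setOfStacks_alt (ope : List (List Int)) (size : Int) : List (List Int) :=
  match ope.foldl (fun acc i => acc.bind (fun f => pvStepB f i)) (some ([] : List Int)) with
  | none => []          -- Python raises here; excluded by Pre_
  | some flat =>
    (PySem.List.pyRange 0 (flat.length : Int) size).map
      (fun j => PySem.List.slice flat (some j) (some (j + size)))

-- ===== PRECONDITION & SPEC =====
-- Pre_ excludes inputs where A raises (an empty operation, op 1 without an argument, a pop
-- with nothing pushed) and degenerate size ≤ 0, where A's per-push singleton chunking is an
-- accident of the 'l < size-1' comparison and B (range with step ≤ 0) raises or returns [].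
def Pre_setOfStacks (ope : List (List Int)) (size : Int) : Prop :=
  1 ≤ size ∧
  (∀ i ∈ ope, i ≠ [] ∧ (i.head? = some 1 → 2 ≤ i.length)) ∧
  (∀ n ∈ List.range (ope.length + 1),
    (ope.take n).countP (fun i => i.head? == some 2) ≤
      (ope.take n).countP (fun i => i.head? == some 1))
instance (ope : List (List Int)) (size : Int) : Decidable (Pre_setOfStacks ope size) := by
  unfold Pre_setOfStacks; infer_instance

def pvWitness_setOfStacks : List (List Int) × Int := ([[1, 5], [1, 6], [2], [1, 7]], 2)

def Spec_setOfStacks (ope : List (List Int)) (size : Int) (out : List (List Int)) : Prop := out = setOfStacks_alt ope size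
instance (ope : List (List Int)) (size : Int) (out : List (List Int)) : Decidable (Spec_setOfStacks ope size out) := by unfold Spec_setOfStacks; infer_instance

-- ===== CLAIM (what is proved, stated in full; the proofs are below) =====
def Claim_equal_setOfStacks : Prop := ∀ (ope : List (List Int)) (size : Int), Dom_setOfStacks ope size → Pre_setOfStacks ope size → Spec_setOfStacks ope size (setOfStacks ope size)

-- ===== LEMMAS AND PROOFS =====

-- A's loop and B's loop, run side by side from a related pair of states, stay related:
-- A's counter equals the current list's length, completed chunks have exactly `size`
-- elements, and B's flat list is the concatenation of A's state.
set_option maxRecDepth 4096 in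
theorem pvLoop (size : Int) (hs : 1 ≤ size) :
    ∀ (ope : List (List Int)) (stack : List (List Int)) (lst : List Int),
    (∀ c ∈ stack, c.length = size.toNat) →
    lst.length < size.toNat →
    (∀ i ∈ ope, i ≠ [] ∧ (i.head? = some 1 → 2 ≤ i.length)) →
    (∀ n : Nat, (ope.take n).countP (fun i => i.head? == some 2) ≤
        (ope.take n).countP (fun i => i.head? == some 1) + (stack.flatten ++ lst).length) →
    ∃ stack' lst',
      ope.foldl (fun acc i => acc.bind (fun st => pvStepA size st i))
          (some (stack, lst, (lst.length : Int))) = some (stack', lst', (lst'.length : Int)) ∧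
      (∀ c ∈ stack', c.length = size.toNat) ∧ lst'.length < size.toNat ∧
      ope.foldl (fun acc i => acc.bind (fun f => pvStepB f i))
          (some (stack.flatten ++ lst)) = some (stack'.flatten ++ lst') := by
  intro ope
  induction ope with
  | nil =>
    intro stack lst h1 h2 _ _
    exact ⟨stack, lst, rfl, h1, h2, rfl⟩
  | cons i rest ih =>
    intro stack lst hchunks hlen hwf hcnt
    obtain ⟨hne, hone⟩ := hwf i (by simp)
    obtain ⟨op, irest, rfl⟩ : ∃ op irest, i = op :: irest := by
      cases i with
      | nil => exact absurd rfl hne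
      | cons a l => exact ⟨a, l, rfl⟩
    have hget0 : PySem.List.pyGet? (op :: irest) 0 = some op := by
      simp [PySem.List.pyGet?, PySem.List.pyIdx?]
    simp only [List.foldl_cons, Option.bind_some]
    by_cases hop1 : op = 1
    · subst hop1
      obtain ⟨v, irest2, rfl⟩ : ∃ v irest2, irest = v :: irest2 := by
        cases irest with
        | nil => simp at hone
        | cons a l => exact ⟨a, l, rfl⟩
      have hget1 : PySem.List.pyGet? (1 :: v :: irest2) 1 = some v := by
        simp [PySem.List.pyGet?, PySem.List.pyIdx?]
      by_cases hlt : (lst.length : Int) < size - 1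
      · have hstep : pvStepA size (stack, lst, (lst.length : Int)) (1 :: v :: irest2)
            = some (stack, lst ++ [v], ((lst ++ [v]).length : Int)) := by
          simp [pvStepA, hget0, hget1, hlt]
        have hstepB : pvStepB (stack.flatten ++ lst) (1 :: v :: irest2)
            = some (stack.flatten ++ (lst ++ [v])) := by
          simp [pvStepB, hget0, hget1]
        rw [hstep, hstepB]
        exact ih stack (lst ++ [v]) hchunks (by simp; omega)
          (fun j hj => hwf j (by simp [hj]))
          (by
            intro n
            have := hcnt (n + 1)
            simp only [List.take_succ_cons, List.countP_cons] at this ⊢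
            simp at this
            simp
            omega)
      · have hstep : pvStepA size (stack, lst, (lst.length : Int)) (1 :: v :: irest2)
            = some (stack ++ [lst ++ [v]], ([] : List Int), (([] : List Int).length : Int)) := by
          simp [pvStepA, hget0, hget1, hlt]
        have hstepB : pvStepB (stack.flatten ++ lst) (1 :: v :: irest2)
            = some ((stack ++ [lst ++ [v]]).flatten ++ ([] : List Int)) := by
          simp [pvStepB, hget0, hget1]
        rw [hstep, hstepB]
        exact ih (stack ++ [lst ++ [v]]) []
          (by
            intro c hc
            rcases List.mem_append.mp hc with h | h
            · exact hchunks c h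
            · simp at h; subst h; simp; omega)
          (by simp; omega)
          (fun j hj => hwf j (by simp [hj]))
          (by
            intro n
            have := hcnt (n + 1)
            simp only [List.take_succ_cons, List.countP_cons] at this ⊢
            simp at this
            simp
            omega)
    · by_cases hop2 : op = 2
      · subst hop2
        by_cases h0 : lst.length = 0
        · have hlst : lst = [] := List.length_eq_zero_iff.mp h0
          subst hlst
          have hfl : 1 ≤ stack.flatten.length := by
            have := hcnt 1
            simp [List.countP_cons] at this ⊢
            omega
          have hstackne : stack ≠ [] := by
            intro h; subst h; simp at hfl
          have htop := List.getLast_mem hstackne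
          set top := stack.getLast hstackne with htopdef
          have hsplit : stack.dropLast ++ [top] = stack := List.dropLast_append_getLast hstackne
          have hpops : PySem.List.pop? stack = some (top, stack.dropLast) := by
            conv_lhs => rw [← hsplit]
            exact PySem.List.pop?_last _ _
          have htoplen : top.length = size.toNat := hchunks top htop
          have htopne : top ≠ [] := by
            intro h; rw [h] at htoplen; simp at htoplen; omega
          have hx := List.getLast_mem htopne
          set x := top.getLast htopne with hxdef
          have hsplit2 : top.dropLast ++ [x] = top := List.dropLast_append_getLast htopne
          have hpopt : PySem.List.pop? top = some (x, top.dropLast) := by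
            conv_lhs => rw [← hsplit2]
            exact PySem.List.pop?_last _ _
          have hstep : pvStepA size (stack, ([] : List Int), ((([] : List Int).length : Nat) : Int)) (2 :: irest)
              = some (stack.dropLast, top.dropLast, ((top.dropLast.length : Nat) : Int)) := by
            simp [pvStepA, hget0, hpops, hpopt]
            simp [List.length_dropLast, htoplen]
            omega
          have hstepB : pvStepB (stack.flatten ++ ([] : List Int)) (2 :: irest)
              = some (stack.dropLast.flatten ++ top.dropLast) := by
            have : stack.flatten = (stack.dropLast.flatten ++ top.dropLast) ++ [x] := by
              conv_lhs => rw [← hsplit]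
              conv_rhs => rw [List.append_assoc, hsplit2]
              conv_lhs => rw [← hsplit]
              simp
            simp [pvStepB, hget0, this]
            exact ⟨x, by rw [← List.append_assoc]; exact PySem.List.pop?_last _ _⟩
          rw [hstep, hstepB]
          exact ih stack.dropLast top.dropLast
            (fun c hc => hchunks c (List.dropLast_subset _ hc))
            (by simp [List.length_dropLast]; omega)
            (fun j hj => hwf j (by simp [hj]))
            (by
              intro n
              have := hcnt (n + 1)
              have hfllen : stack.flatten.length = stack.dropLast.flatten.length + top.length := by
                conv_lhs => rw [← hsplit]
                simp
              simp only [List.take_succ_cons, List.countP_cons] at this ⊢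
              simp at this
              simp
              have e1 : (stack.map List.length).sum = ((stack.map List.length).dropLast).sum + top.length := by
                conv_lhs => rw [← hsplit]
                simp [List.map_dropLast]
              have e2 : stack.dropLast.flatten.length = ((stack.map List.length).dropLast).sum := by
                simp [List.map_dropLast]
              omega)
        · have hlstne : lst ≠ [] := by
            intro h; subst h; simp at h0
          have hsplit : lst.dropLast ++ [lst.getLast hlstne] = lst := List.dropLast_append_getLast hlstne
          have hpopl : PySem.List.pop? lst = some (lst.getLast hlstne, lst.dropLast) := by
            conv_lhs => rw [← hsplit]
            exact PySem.List.pop?_last _ _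
          have hstep : pvStepA size (stack, lst, (lst.length : Int)) (2 :: irest)
              = some (stack, lst.dropLast, ((lst.dropLast.length : Nat) : Int)) := by
            simp [pvStepA, hget0, hpopl, h0]
            omega
          have hstepB : pvStepB (stack.flatten ++ lst) (2 :: irest)
              = some (stack.flatten ++ lst.dropLast) := by
            have : stack.flatten ++ lst = (stack.flatten ++ lst.dropLast) ++ [lst.getLast hlstne] := by
              rw [List.append_assoc, hsplit]
            simp [pvStepB, hget0, this]
            exact ⟨lst.getLast hlstne, by rw [← List.append_assoc]; exact PySem.List.pop?_last _ _⟩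
          rw [hstep, hstepB]
          exact ih stack lst.dropLast hchunks
            (by simp [List.length_dropLast]; omega)
            (fun j hj => hwf j (by simp [hj]))
            (by
              intro n
              have := hcnt (n + 1)
              have hl1 : 1 ≤ lst.length := by omega
              simp only [List.take_succ_cons, List.countP_cons] at this ⊢
              simp at this
              simp
              omega)
      · have hstep : pvStepA size (stack, lst, (lst.length : Int)) (op :: irest)
            = some (stack, lst, (lst.length : Int)) := by
          simp [pvStepA, hget0, hop1, hop2]
        have hstepB : pvStepB (stack.flatten ++ lst) (op :: irest)
            = some (stack.flatten ++ lst) := by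
          simp [pvStepB, hget0, hop1, hop2]
        rw [hstep, hstepB]
        exact ih stack lst hchunks hlen
          (fun j hj => hwf j (by simp [hj]))
          (by
            intro n
            have := hcnt (n + 1)
            simp only [List.take_succ_cons, List.countP_cons] at this ⊢
            simp [hop1, hop2] at this
            simp [hop1, hop2]
            omega)

-- B's final comprehension, written over range/slice, in recursion-friendly form
theorem pvChunksNorm (size : Int) (hs : 1 ≤ size) (flat : List Int) :
    (PySem.List.pyRange 0 (flat.length : Int) size).map
        (fun j => PySem.List.slice flat (some j) (some (j + size))) =
    (List.range ((flat.length + size.toNat - 1) / size.toNat)).map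
        (fun k => (flat.drop (size.toNat * k)).take size.toNat) := by
  have hsz : ((size.toNat : Int)) = size := Int.toNat_of_nonneg (by omega)
  rw [PySem.List.pyRange_of_pos 0 (flat.length : Int) (by omega)]
  have hcount : (if (0:Int) < (flat.length : Int) then (((flat.length : Int) - 0 + size - 1) / size).toNat else 0)
      = (flat.length + size.toNat - 1) / size.toNat := by
    by_cases h0 : flat.length = 0
    · simp [h0]
      exact (Nat.div_eq_of_lt (by omega)).symm
    · rw [if_pos (by omega)]
      have he : (flat.length : Int) - 0 + size - 1 = ((flat.length + size.toNat - 1 : Nat) : Int) := by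
        push_cast [Nat.cast_sub (by omega : 1 ≤ flat.length + size.toNat)]
        omega
      rw [he, ← hsz, ← Int.natCast_ediv, Int.toNat_natCast]
      congr 1
  rw [hcount, List.map_map]
  apply List.map_congr_left
  intro k _
  simp only [Function.comp]
  have h1 : (0 : Int) + size * (k:Int) = ((size.toNat * k : Nat) : Int) := by
    push_cast; rw [hsz]; ring
  have h2 : (0 : Int) + size * (k:Int) + size = ((size.toNat * k : Nat) : Int) + ((size.toNat : Nat) : Int) := by
    push_cast; rw [hsz]; ring
  rw [show (some ((0:Int) + size * (k:Int) + size)) = some (((size.toNat * k : Nat) : Int) + ((size.toNat : Nat) : Int)) from congrArg _ h2, h1]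
  exact PySem.List.slice_natCast_add flat (size.toNat * k) size.toNat

-- chunking the concatenation of full chunks plus a short remainder gives them back
theorem pvChunksRec (s : Nat) (hs : 1 ≤ s) :
    ∀ (stack : List (List Int)) (lst : List Int),
    (∀ c ∈ stack, c.length = s) → lst.length < s →
    (List.range (((stack.flatten ++ lst).length + s - 1) / s)).map
        (fun k => ((stack.flatten ++ lst).drop (s * k)).take s) =
      if lst.length ≠ 0 then stack ++ [lst] else stack := by
  intro stack
  induction stack with
  | nil =>
    intro lst _ hlen
    by_cases h0 : lst.length = 0
    · simp [List.length_eq_zero_iff.mp h0]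
      omega
    · have hc : (([] : List (List Int)).flatten ++ lst).length = lst.length := by simp
      rw [if_pos h0]
      have hdiv : ((([] : List (List Int)).flatten ++ lst).length + s - 1) / s = 1 := by
        rw [hc]
        refine Nat.div_eq_of_lt_le (by omega) (by omega)
      rw [hdiv]
      simp [List.take_of_length_le (by omega : lst.length ≤ s)]
  | cons c rest ih =>
    intro lst hchunks hlen
    have hcl : c.length = s := hchunks c (by simp)
    have hflat : (c :: rest).flatten ++ lst = c ++ (rest.flatten ++ lst) := by simp
    rw [hflat]
    have hdiv : ((c ++ (rest.flatten ++ lst)).length + s - 1) / s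
        = ((rest.flatten ++ lst).length + s - 1) / s + 1 := by
      rw [List.length_append, hcl]
      rw [show s + (rest.flatten ++ lst).length + s - 1 = ((rest.flatten ++ lst).length + s - 1) + s by omega]
      exact Nat.add_div_right _ (by omega)
    rw [hdiv, List.range_succ_eq_map, List.map_cons, List.map_map]
    have hhead : ((c ++ (rest.flatten ++ lst)).drop (s * 0)).take s = c := by
      simp [List.take_left' hcl]
    have htail : ∀ k : Nat, (((c ++ (rest.flatten ++ lst)).drop (s * (k + 1))).take s)
        = (((rest.flatten ++ lst)).drop (s * k)).take s := by
      intro k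
      have : s * (k + 1) = c.length + s * k := by rw [hcl]; ring
      rw [this, List.drop_append, List.drop_eq_nil_of_le (by omega : c.length ≤ c.length + s * k),
        show c.length + s * k - c.length = s * k by omega, List.nil_append]
    have := ih lst (fun x hx => hchunks x (by simp [hx])) hlen
    rw [show ((fun k => ((c ++ (rest.flatten ++ lst)).drop (s * k)).take s) ∘ Nat.succ)
        = (fun k : Nat => (((rest.flatten ++ lst)).drop (s * k)).take s) from funext (fun k => htail k)]
    rw [hhead, this]
    by_cases h0 : lst.length = 0 <;> simp [h0]

-- ===== VERDICT (by name: the statement is the Claim_ definition above) =====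
theorem setOfStacks_spec : Claim_equal_setOfStacks := by
  intro ope size _ hpre
  obtain ⟨hs, hwf, hcnt⟩ := hpre
  unfold Spec_setOfStacks
  obtain ⟨stack', lst', hA, hinv, hlen, hB⟩ :=
    pvLoop size hs ope [] [] (by simp) (by simp; omega) hwf (by
      intro n
      by_cases hn : n ≤ ope.length
      · have := hcnt n (by simp [List.mem_range]; omega)
        simpa using this
      · have := hcnt ope.length (by simp)
        simpa [List.take_of_length_le (by omega : ope.length ≤ n)] using this)
  simp only [List.length_nil, Nat.cast_zero, List.flatten_nil, List.nil_append] at hA hB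
  unfold setOfStacks setOfStacks_alt
  rw [hA, hB]
  simp only
  rw [pvChunksNorm size hs, pvChunksRec size.toNat (by omega) stack' lst' hinv hlen]
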